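-- pv_equiv track=rewrite | github.com/ombystoma-young/immune-evasion-hot-spots | scripts/write_gff_all_datasets.py | define_clu_main_product
-- ===== SOURCE A (Python) =====
-- def define_clu_main_product(products: dict) -> str:
--     """
--
--     :param functions: (dict) contains of all functions of cluster
--     :return: main_function (str) name of cluster's main functional product
--     """
--     main_function = None
--     max_count = 0
--     for product, count in products.items():
--         if product != 'hypothetical protein' and count > max_count:
--             main_function = product
--             max_count = count
--     if not main_function and ('hypothetical protein' in products.keys()):
--         main_function = 'hypothetical protein'
--     return main_function
-- ===== SOURCE B (Python) =====
-- def define_clu_main_product(products: dict) -> str: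
--     best = max((count for product, count in products.items()
--                 if product != 'hypothetical protein'), default=0)
--     main_function = None
--     if best > 0:
--         main_function = next(product for product, count in products.items()
--                              if product != 'hypothetical protein' and count == best)
--     if not main_function and ('hypothetical protein' in products.keys()):
--         main_function = 'hypothetical protein'
--     return main_function
-- ===== Notes on version B (the rewrite author's own statement) =====
-- stated objective: alternative
-- what changed: Replaces A's single running-argmax loop (tracking candidate name and max count in mutable state) with a declarative two-phase computation: max() with default over the non-hypothetical counts, then next() to fetch the first entry achieving that maximum; the fallback guard is unchanged.
import Mathlib
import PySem

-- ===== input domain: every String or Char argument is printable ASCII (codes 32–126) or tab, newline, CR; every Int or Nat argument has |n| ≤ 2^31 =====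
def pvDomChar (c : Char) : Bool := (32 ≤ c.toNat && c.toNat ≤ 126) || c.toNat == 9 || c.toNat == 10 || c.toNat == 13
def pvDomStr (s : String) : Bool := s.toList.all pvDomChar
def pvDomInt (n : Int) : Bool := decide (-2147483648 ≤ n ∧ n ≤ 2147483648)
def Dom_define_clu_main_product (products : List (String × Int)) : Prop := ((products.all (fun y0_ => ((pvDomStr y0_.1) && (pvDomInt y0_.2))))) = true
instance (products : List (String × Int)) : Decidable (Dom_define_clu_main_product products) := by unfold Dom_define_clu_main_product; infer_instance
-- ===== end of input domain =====

-- B replaces A's running-argmax loop by a two-phase max-then-first-match computation (alternative decomposition, same O(n) cost).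


-- ===== PORT A =====
-- A's loop body: update (main_function, max_count) when product ≠ 'hypothetical protein' and count > max_count
def aStep (s : Option String × Int) (pc : String × Int) : Option String × Int :=
  if pc.1 ≠ "hypothetical protein" ∧ pc.2 > s.2 then (some pc.1, pc.2) else s

def define_clu_main_product (products : List (String × Int)) : Option String :=
  let r := products.foldl aStep (none, 0)
  let mf := r.1
  -- 'if not main_function and (hyp in products.keys())': falsy means None or the empty string
  if (mf = none ∨ mf = some "") ∧ (products.map Prod.fst).contains "hypothetical protein" = true
  then some "hypothetical protein" else mf

-- ===== PORT B =====
-- counts of the non-hypothetical entries (the generator inside max(...))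
def bCounts (products : List (String × Int)) : List Int :=
  products.filterMap (fun pc => if pc.1 ≠ "hypothetical protein" then some pc.2 else none)

def define_clu_main_product_alt (products : List (String × Int)) : Option String :=
  -- max(..., default=0)
  let best := (PySem.List.max? (bCounts products) (fun x => x)).getD 0
  let mf : Option String :=
    if best > 0 then
      -- next(...): first entry with that count
      (products.find? (fun pc => pc.1 != "hypothetical protein" && pc.2 == best)).map Prod.fst
    else none
  if (mf = none ∨ mf = some "") ∧ (products.map Prod.fst).contains "hypothetical protein" = true
  then some "hypothetical protein" else mf

-- ===== PRECONDITION & SPEC =====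
def Spec_define_clu_main_product (products : List (String × Int)) (out : Option String) : Prop := out = define_clu_main_product_alt products
instance (products : List (String × Int)) (out : Option String) : Decidable (Spec_define_clu_main_product products out) := by unfold Spec_define_clu_main_product; infer_instance

-- ===== CLAIM (what is proved, stated in full; the proofs are below) =====
def Claim_equal_define_clu_main_product : Prop := ∀ (products : List (String × Int)), Dom_define_clu_main_product products → Spec_define_clu_main_product products (define_clu_main_product products)

-- ===== LEMMAS AND PROOFS =====

-- Characterisation of A's loop from an arbitrary state (mf, c):
-- with M the running max of the non-hypothetical counts seeded with c, the loop either
-- finds some count above c (then it ends at the first entry achieving M, paired with M)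
-- or leaves the state unchanged.
theorem aLoop_char (L : List (String × Int)) (mf : Option String) (c : Int) :
    L.foldl aStep (mf, c) =
      (if (bCounts L).foldl max c > c then
        ((L.find? (fun pc => pc.1 != "hypothetical protein" && pc.2 == (bCounts L).foldl max c)).map Prod.fst,
          (bCounts L).foldl max c)
      else (mf, c)) := by
  induction L generalizing mf c with
  | nil => simp [bCounts]
  | cons hd t ih =>
    obtain ⟨p, c'⟩ := hd
    by_cases hp : p = "hypothetical protein"
    · have hb : bCounts ((p, c') :: t) = bCounts t := by simp [bCounts, hp]
      have hstep : aStep (mf, c) (p, c') = (mf, c) := by simp [aStep, hp]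
      have hfind : ∀ M : Int,
          List.find? (fun pc => pc.1 != "hypothetical protein" && pc.2 == M) ((p, c') :: t)
            = List.find? (fun pc => pc.1 != "hypothetical protein" && pc.2 == M) t := by
        intro M; rw [List.find?_cons_of_neg]; simp [hp]
      simp only [List.foldl_cons, hstep, hb, ih, hfind]
    · have hb : bCounts ((p, c') :: t) = c' :: bCounts t := by simp [bCounts, hp]
      by_cases hc : c' > c
      · have hstep : aStep (mf, c) (p, c') = (some p, c') := by simp [aStep, hp, hc]
        have hmax : (bCounts ((p, c') :: t)).foldl max c = (bCounts t).foldl max c' := by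
          rw [hb]; simp [max_eq_right (le_of_lt hc)]
        have hM := (PySem.List.le_foldl_max (bCounts t) c').1
        simp only [List.foldl_cons, hstep, ih, hmax]
        by_cases h2 : (bCounts t).foldl max c' > c'
        · have hgt : (bCounts t).foldl max c' > c := lt_trans hc h2
          have hne : (c' == (bCounts t).foldl max c') = false := by
            simp; omega
          rw [if_pos h2, if_pos hgt, List.find?_cons_of_neg]
          simp [hne]
        · have heq : (bCounts t).foldl max c' = c' := le_antisymm (by omega) hM
          rw [if_neg h2, if_pos (by omega : (bCounts t).foldl max c' > c)]
          rw [List.find?_cons_of_pos]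
          · simp [heq]
          · simp [hp, heq]
      · have hstep : aStep (mf, c) (p, c') = (mf, c) := by simp [aStep, hc]
        have hmax : (bCounts ((p, c') :: t)).foldl max c = (bCounts t).foldl max c := by
          rw [hb]; simp [max_eq_left (by omega : c' ≤ c)]
        simp only [List.foldl_cons, hstep, ih, hmax]
        by_cases h2 : (bCounts t).foldl max c > c
        · have hne : (c' == (bCounts t).foldl max c) = false := by simp; omega
          rw [if_pos h2, if_pos h2, List.find?_cons_of_neg]
          simp [hne]
        · rw [if_neg h2, if_neg h2]

-- B's 'best' (max? with default 0) coincides with A's running max seeded with 0 whenever either is positive,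
-- and both are ≤ 0 otherwise.
theorem best_eq_foldl_max (K : List Int) :
    ((PySem.List.max? K (fun x => x)).getD 0 > 0 ∨ K.foldl max 0 > 0) →
    (PySem.List.max? K (fun x => x)).getD 0 = K.foldl max 0 := by
  intro h
  cases K with
  | nil => simp [PySem.List.max?]
  | cons x t =>
    rw [PySem.List.max?_id_cons] at h ⊢
    simp only [Option.getD_some] at h ⊢
    have hm0 : (x :: t).foldl max 0 = t.foldl max (max 0 x) := by simp
    rw [hm0] at h ⊢
    have h1 := (PySem.List.le_foldl_max t x).1
    have h2 := (PySem.List.le_foldl_max t x).2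
    have h3 := (PySem.List.le_foldl_max t (max 0 x)).1
    have h4 := (PySem.List.le_foldl_max t (max 0 x)).2
    have hAB : t.foldl max x ≤ t.foldl max (max 0 x) := by
      rcases PySem.List.foldl_max_mem t x with he | hm
      · rw [he]; exact le_trans (le_max_right 0 x) h3
      · exact h4 _ hm
    rcases PySem.List.foldl_max_mem t (max 0 x) with he' | hm'
    · rw [he'] at h hAB ⊢
      rcases le_or_gt 0 x with hx | hx
      · rw [max_eq_right hx] at h hAB ⊢
        exact le_antisymm hAB h1
      · rw [max_eq_left (le_of_lt hx)] at h hAB ⊢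
        omega
    · exact le_antisymm hAB (h2 _ hm')

-- ===== VERDICT (by name: the statement is the Claim_ definition above) =====
theorem define_clu_main_product_spec : Claim_equal_define_clu_main_product := by
  intro products _
  unfold Spec_define_clu_main_product define_clu_main_product define_clu_main_product_alt
  rw [aLoop_char]
  set K := bCounts products with hKdef
  by_cases h : K.foldl max 0 > 0
  · have hbest : (PySem.List.max? K (fun x => x)).getD 0 = K.foldl max 0 :=
      best_eq_foldl_max K (Or.inr h)
    simp only [hbest, if_pos h]
  · have hbest : ¬ ((PySem.List.max? K (fun x => x)).getD 0 > 0) := by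
      intro hpos
      exact h (best_eq_foldl_max K (Or.inl hpos) ▸ hpos)
    simp only [if_neg h, if_neg hbest]
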